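-- pv_equiv track=rewrite | github.com/TomKazPoland/app_anonymous | scripts/benchmark_anonymization.py | sample_leaks
-- ===== SOURCE A (Python) =====
-- def sample_leaks(values, out_text, limit=8):
--     leaks = []
--     seen = set()
--     for v in values:
--         if not v or v in seen:
--             continue
--         if v in out_text:
--             leaks.append(v)
--             seen.add(v)
--             if len(leaks) >= limit:
--                 break
--     return leaks
-- ===== SOURCE B (Python) =====
-- def sample_leaks(values, out_text, limit=8):
--     # scan the TEXT once per distinct value length, collecting which values occur,
--     # then one ordered pass over values to dedupe and cap at limit
--     targets = {v for v in values if v}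
--     n = len(out_text)
--     matched = set()
--     for L in sorted({len(v) for v in targets}):
--         for i in range(n - L + 1):
--             w = out_text[i:i + L]
--             if w in targets:
--                 matched.add(w)
--     out = []
--     for v in values:
--         if v in matched:
--             matched.discard(v)
--             out.append(v)
--             if len(out) >= limit:
--                 break
--     return out
-- ===== Notes on version B (the rewrite author's own statement) =====
-- stated objective: faster
-- what changed: A searches each value as a substring of the text (one scan of the text per value); B inverts the traversal: it slides a window of each distinct value length over the TEXT once, collecting via hashed set lookups the set of values that occur, then makes one ordered pass over values to dedupe and cap at limit.
import Mathlib
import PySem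

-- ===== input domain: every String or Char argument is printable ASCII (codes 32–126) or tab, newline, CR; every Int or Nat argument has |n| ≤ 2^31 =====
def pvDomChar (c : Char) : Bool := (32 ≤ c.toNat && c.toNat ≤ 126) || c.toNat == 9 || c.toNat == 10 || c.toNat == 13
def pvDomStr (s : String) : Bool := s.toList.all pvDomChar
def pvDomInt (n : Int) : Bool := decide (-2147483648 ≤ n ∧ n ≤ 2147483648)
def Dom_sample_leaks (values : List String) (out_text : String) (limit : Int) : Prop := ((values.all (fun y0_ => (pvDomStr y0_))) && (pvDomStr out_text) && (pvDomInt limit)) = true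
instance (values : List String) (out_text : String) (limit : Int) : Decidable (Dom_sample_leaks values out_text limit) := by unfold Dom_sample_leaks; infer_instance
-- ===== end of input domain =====

-- B inverts A's traversal: instead of searching each value inside the text, it slides windows of
-- each distinct value length over the TEXT collecting the set of values that occur, then one
-- ordered pass over values dedupes and caps at limit; same return value on every input.

-- ===== PORT A =====
-- the 'for v in values' loop: state = (leaks, seen); break = early return
def sampleLoopA (out_text : String) (limit : Int) :
    List String → List String → PySem.Set String → List String
  | [], leaks, _ => leaks
  | v :: rest, leaks, seen =>
    if v == "" || PySem.Set.contains seen v then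
      sampleLoopA out_text limit rest leaks seen
    else if PySem.Str.isIn v out_text then
      -- leaks.append(v); seen.add(v); if len(leaks) >= limit: break
      if limit ≤ ((leaks ++ [v]).length : Int) then leaks ++ [v]
      else sampleLoopA out_text limit rest (leaks ++ [v]) (PySem.Set.add seen v)
    else sampleLoopA out_text limit rest leaks seen

def sample_leaks (values : List String) (out_text : String) (limit : Int) : List String :=
  sampleLoopA out_text limit values [] PySem.Set.empty

-- ===== PORT B =====
-- inner-loop body: w = out_text[i:i+L]; if w in targets: matched.add(w)
def scanStepB (targets : PySem.Set String) (out_text : String)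
    (m : PySem.Set String) (i L : Int) : PySem.Set String :=
  -- w = out_text[i:i+L], written out at both of its uses
  if PySem.Set.contains targets (PySem.Str.slice out_text (some i) (some (i + L)))
  then PySem.Set.add m (PySem.Str.slice out_text (some i) (some (i + L))) else m

-- for i in range(n - L + 1): …
def scanLenB (targets : PySem.Set String) (out_text : String)
    (matched : PySem.Set String) (L : Int) : PySem.Set String :=
  (PySem.List.pyRange 0 ((out_text.length : Int) - L + 1) 1).foldl
    (fun m i => scanStepB targets out_text m i L) matched

-- second loop: for v in values: if v in matched: discard; append; break on limit
def pickLoopB (limit : Int) : List String → PySem.Set String → List String → List String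
  | [], _, out => out
  | v :: rest, matched, out =>
    if PySem.Set.contains matched v then
      if limit ≤ ((out ++ [v]).length : Int) then out ++ [v]
      else pickLoopB limit rest (PySem.Set.discard matched v) (out ++ [v])
    else pickLoopB limit rest matched out

def sample_leaks_alt (values : List String) (out_text : String) (limit : Int) : List String :=
  let targets := PySem.Set.ofList (values.filter (fun v => !(v == "")))
  let lens := PySem.List.sorted
    (PySem.Set.ofList (targets.map (fun v => (v.length : Int)))) (fun x => x) false
  let matched := lens.foldl (scanLenB targets out_text) PySem.Set.empty
  pickLoopB limit values matched []

-- ===== PRECONDITION & SPEC =====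
def Spec_sample_leaks (values : List String) (out_text : String) (limit : Int) (out : List String) : Prop := out = sample_leaks_alt values out_text limit
instance (values : List String) (out_text : String) (limit : Int) (out : List String) : Decidable (Spec_sample_leaks values out_text limit out) := by unfold Spec_sample_leaks; infer_instance

-- ===== CLAIM (what is proved, stated in full; the proofs are below) =====
def Claim_equal_sample_leaks : Prop := ∀ (values : List String) (out_text : String) (limit : Int), Dom_sample_leaks values out_text limit → Spec_sample_leaks values out_text limit (sample_leaks values out_text limit)

-- ===== LEMMAS AND PROOFS =====

lemma str_ext {s t : String} (h : s.toList = t.toList) : s = t :=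
  String.toList_inj.mp h

-- every window the scan looks at occurs in the text
lemma slice_isIn (s : String) (i L : Int) (hi : 0 ≤ i) (hL : 0 ≤ L) :
    PySem.Str.isIn (PySem.Str.slice s (some i) (some (i + L))) s = true := by
  rw [PySem.Str.isIn_iff_infix, PySem.Str.toList_slice, PySem.Chars.slice_eq_listSlice,
    PySem.List.slice_toNat _ hi (by omega)]
  exact ((List.take_prefix _ _).isInfix).trans (List.drop_suffix _ _).isInfix

-- membership is preserved by the inner fold
lemma inner_mono (targets : PySem.Set String) (s : String) (L : Int) (l : List Int) :
    ∀ (m : PySem.Set String) (x : String), x ∈ m →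
      x ∈ l.foldl (fun m i => scanStepB targets s m i L) m := by
  induction l with
  | nil => intro m x hx; simpa using hx
  | cons a l ih =>
    intro m x hx
    simp only [List.foldl_cons]
    apply ih
    unfold scanStepB
    split
    · exact (PySem.Set.mem_add _ _ _).mpr (Or.inl hx)
    · exact hx

-- everything the inner fold adds is an in-targets window of the text
lemma inner_sound (targets : PySem.Set String) (s : String) (L : Int) (hL : 0 ≤ L)
    (l : List Int) (hl : ∀ i ∈ l, 0 ≤ i) :
    ∀ (m : PySem.Set String) (x : String),
      x ∈ l.foldl (fun m i => scanStepB targets s m i L) m →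
      x ∈ m ∨ (x ∈ targets ∧ PySem.Str.isIn x s = true) := by
  induction l with
  | nil => intro m x hx; exact Or.inl (by simpa using hx)
  | cons a l ih =>
    intro m x hx
    simp only [List.foldl_cons] at hx
    rcases ih (fun i hi => hl i (by simp [hi])) _ _ hx with h | h
    · unfold scanStepB at h
      split at h
      · rcases (PySem.Set.mem_add _ _ _).mp h with h | rfl
        · exact Or.inl h
        · refine Or.inr ⟨(PySem.Set.contains_iff _ _).mp (by assumption), ?_⟩
          exact slice_isIn s a L (hl a (by simp)) hL
      · exact Or.inl h
    · exact Or.inr h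

-- the window at an index of the range really gets collected
lemma inner_complete (targets : PySem.Set String) (s : String) (L : Int) (l : List Int)
    (i : Int) (hi : i ∈ l)
    (hc : PySem.Set.contains targets (PySem.Str.slice s (some i) (some (i + L))) = true) :
    ∀ (m : PySem.Set String),
      PySem.Str.slice s (some i) (some (i + L))
        ∈ l.foldl (fun m i => scanStepB targets s m i L) m := by
  induction l with
  | nil => simp at hi
  | cons a l ih =>
    intro m
    simp only [List.foldl_cons]
    rcases List.mem_cons.mp hi with rfl | hi'
    · apply inner_mono
      unfold scanStepB
      rw [if_pos hc]
      exact (PySem.Set.mem_add _ _ _).mpr (Or.inr rfl)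
    · exact ih hi' _

-- membership is preserved by the outer fold
lemma outer_mono (targets : PySem.Set String) (s : String) (lens : List Int) :
    ∀ (m : PySem.Set String) (x : String), x ∈ m →
      x ∈ lens.foldl (scanLenB targets s) m := by
  induction lens with
  | nil => intro m x hx; simpa using hx
  | cons L lens ih =>
    intro m x hx
    simp only [List.foldl_cons]
    exact ih _ _ (inner_mono targets s L _ m x hx)

lemma outer_sound (targets : PySem.Set String) (s : String) (lens : List Int)
    (hlens : ∀ L ∈ lens, 0 ≤ L) :
    ∀ (m : PySem.Set String) (x : String),
      x ∈ lens.foldl (scanLenB targets s) m →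
      x ∈ m ∨ (x ∈ targets ∧ PySem.Str.isIn x s = true) := by
  induction lens with
  | nil => intro m x hx; exact Or.inl (by simpa using hx)
  | cons L lens ih =>
    intro m x hx
    simp only [List.foldl_cons] at hx
    rcases ih (fun L' h => hlens L' (by simp [h])) _ _ hx with h | h
    · unfold scanLenB at h
      rcases inner_sound targets s L (hlens L (by simp)) _
        (fun i hi => (PySem.List.mem_pyRange_one.mp hi).1) _ _ h with h | h
      · exact Or.inl h
      · exact Or.inr h
    · exact Or.inr h

lemma outer_complete (targets : PySem.Set String) (s : String) (lens : List Int)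
    (L i : Int) (hL : L ∈ lens)
    (hi : i ∈ PySem.List.pyRange 0 ((s.length : Int) - L + 1) 1)
    (hc : PySem.Set.contains targets (PySem.Str.slice s (some i) (some (i + L))) = true) :
    ∀ (m : PySem.Set String),
      PySem.Str.slice s (some i) (some (i + L)) ∈ lens.foldl (scanLenB targets s) m := by
  induction lens with
  | nil => simp at hL
  | cons L' lens ih =>
    intro m
    simp only [List.foldl_cons]
    rcases List.mem_cons.mp hL with rfl | hL'
    · exact outer_mono targets s lens _ _ (inner_complete targets s L _ i hi hc m)
    · exact ih hL' _

-- characterisation of B's matched set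
lemma matched_iff (values : List String) (s : String) (w : String) :
    (w ∈ (PySem.List.sorted
        (PySem.Set.ofList ((PySem.Set.ofList (values.filter (fun v => !(v == "")))).map
          (fun v => (v.length : Int)))) (fun x => x) false).foldl
        (scanLenB (PySem.Set.ofList (values.filter (fun v => !(v == "")))) s) PySem.Set.empty)
      ↔ (w ∈ PySem.Set.ofList (values.filter (fun v => !(v == ""))) ∧ PySem.Str.isIn w s = true) := by
  set targets := PySem.Set.ofList (values.filter (fun v => !(v == ""))) with htargets
  constructor
  · intro h
    rcases outer_sound targets s _ (fun L hL => by
        rw [PySem.List.mem_sorted] at hL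
        obtain ⟨v, _, hvl⟩ := List.mem_map.mp ((PySem.Set.mem_ofList _ _).mp hL)
        rw [← hvl]; positivity) _ _ h with h | h
    · simp [PySem.Set.empty] at h
    · exact h
  · rintro ⟨hw, hin⟩
    -- w occurs in s : get the window index
    obtain ⟨p, t, hpt⟩ := (PySem.Str.isIn_iff_infix w s).mp hin
    have hws : PySem.Str.slice s (some (p.length : Int))
        (some ((p.length : Int) + (w.length : Int))) = w := by
      apply str_ext
      rw [PySem.Str.toList_slice, PySem.Chars.slice_eq_listSlice,
        PySem.List.slice_toNat _ (by positivity) (by positivity)]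
      have h1 : ((p.length : Int) + (w.length : Int)).toNat = p.length + w.length := by omega
      have h2 : ((p.length : Int)).toNat = p.length := by omega
      rw [h1, h2, ← hpt]
      have hwl : w.toList.length = w.length := by simp
      rw [List.append_assoc, List.drop_left, Nat.add_sub_cancel_left, ← hwl, List.take_left]
    have hlen : p.length + w.length ≤ s.length := by
      have := congrArg List.length hpt
      simp at this
      omega
    have hL : (w.length : Int) ∈ PySem.List.sorted
        (PySem.Set.ofList (targets.map (fun v => (v.length : Int)))) (fun x => x) false := by
      rw [PySem.List.mem_sorted]
      exact (PySem.Set.mem_ofList _ _).mpr (List.mem_map.mpr ⟨w, hw, rfl⟩)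
    have hi : (p.length : Int) ∈ PySem.List.pyRange 0 ((s.length : Int) - (w.length : Int) + 1) 1 := by
      rw [PySem.List.mem_pyRange_one]
      constructor
      · positivity
      · omega
    have hc : PySem.Set.contains targets (PySem.Str.slice s (some (p.length : Int))
        (some ((p.length : Int) + (w.length : Int)))) = true := by
      rw [hws]; exact (PySem.Set.contains_iff _ _).mpr hw
    have := outer_complete targets s _ (w.length : Int) (p.length : Int) hL hi hc PySem.Set.empty
    rwa [hws] at this

-- Boolean forms of set membership under discard / add
lemma contains_discard_eq (s : PySem.Set String) (x y : String) :
    PySem.Set.contains (PySem.Set.discard s x) y = (PySem.Set.contains s y && !(y == x)) := by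
  rw [Bool.eq_iff_iff]
  simp [PySem.Set.mem_discard]
lemma contains_add_eq (s : PySem.Set String) (x y : String) :
    PySem.Set.contains (PySem.Set.add s x) y = (PySem.Set.contains s y || y == x) := by
  rw [Bool.eq_iff_iff]
  simp [PySem.Set.mem_add]

-- the two output loops agree under the matched/seen invariant
lemma loops_eq (out_text : String) (limit : Int) :
    ∀ (rest : List String) (matched seen : PySem.Set String) (out : List String),
      (∀ v ∈ rest, PySem.Set.contains matched v
          = (!(v == "") && PySem.Str.isIn v out_text && !(PySem.Set.contains seen v))) →
      pickLoopB limit rest matched out = sampleLoopA out_text limit rest out seen := by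
  intro rest
  induction rest with
  | nil => intro matched seen out _; rfl
  | cons v rest ih =>
    intro matched seen out hinv
    have hv := hinv v (by simp)
    simp only [pickLoopB, sampleLoopA]
    by_cases hb : (v == "" || PySem.Set.contains seen v) = true
    · rw [if_pos hb]
      have hcm : PySem.Set.contains matched v = false := by
        rcases Bool.or_eq_true_iff.mp hb with h | h <;> rw [hv, h] <;> simp
      rw [if_neg (fun hc => by rw [hcm] at hc; exact Bool.noConfusion hc)]
      exact ih matched seen out (fun u hu => hinv u (by simp [hu]))
    · rw [if_neg hb]
      have hbf : (v == "" || PySem.Set.contains seen v) = false := by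
        cases h : (v == "" || PySem.Set.contains seen v)
        · rfl
        · exact absurd h hb
      have hne : (v == "") = false := (Bool.or_eq_false_iff.mp hbf).1
      have hns : PySem.Set.contains seen v = false := (Bool.or_eq_false_iff.mp hbf).2
      by_cases hin : PySem.Str.isIn v out_text = true
      · have hcm : PySem.Set.contains matched v = true := by
          rw [hv, hne, hns, hin]; rfl
        rw [if_pos hcm, if_pos hin]
        by_cases hbrk : limit ≤ ((out ++ [v]).length : Int)
        · rw [if_pos hbrk, if_pos hbrk]
        · rw [if_neg hbrk, if_neg hbrk]
          refine ih _ _ _ (fun u hu => ?_)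
          rw [contains_discard_eq, contains_add_eq, hinv u (by simp [hu])]
          cases h1 : (u == "") <;> cases h2 : PySem.Str.isIn u out_text <;>
            cases h3 : PySem.Set.contains seen u <;> cases h4 : (u == v) <;> simp
      · have hinf : PySem.Str.isIn v out_text = false := by simpa using hin
        have hcm : PySem.Set.contains matched v = false := by
          rw [hv, hinf]; simp
        rw [if_neg (fun hc => by rw [hcm] at hc; exact Bool.noConfusion hc), if_neg hin]
        exact ih matched seen out (fun u hu => hinv u (by simp [hu]))

-- ===== VERDICT (by name: the statement is the Claim_ definition above) =====
theorem sample_leaks_spec : Claim_equal_sample_leaks := by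
  intro values out_text limit _
  unfold Spec_sample_leaks sample_leaks sample_leaks_alt
  refine (loops_eq out_text limit values _ PySem.Set.empty [] (fun v hv => ?_)).symm
  rw [Bool.eq_iff_iff, PySem.Set.contains_iff, matched_iff values out_text v]
  simp [PySem.Set.mem_ofList, PySem.Set.empty, List.mem_filter, hv]
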